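-- pv_equiv track=rewrite | github.com/bala2404jbs/code_modernisation | backend/parsers/ast_parser.py | _extract_variable_declaration
-- ===== SOURCE A (Python) =====
-- from typing import List, Dict, Any, Optional
--
-- def _extract_variable_declaration(lines: List[str], start_line: int, content: str) -> str:
--     """Extract complete variable declaration including initialization"""
--     try:
--         start_idx = start_line - 1
--         line = lines[start_idx]
--
--         # If line ends with semicolon, it's complete
--         if line.strip().endswith(';'):
--             return line
--
--         # Look for semicolon in subsequent lines
--         for i in range(start_idx + 1, min(start_idx + 5, len(lines))):
--             line += '\n' + lines[i]
--             if lines[i].strip().endswith(';'):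
--                 break
--
--         return line
--     except:
--         return lines[start_line - 1] if start_line <= len(lines) else ""
-- ===== SOURCE B (Python) =====
-- def _extract_variable_declaration(lines, start_line, content):
--     """Two-pass: find the end index of the window first, then join the lines."""
--     n = len(lines)
--     start_idx = start_line - 1
--     if start_idx >= n:
--         return ""
--     stop = max(start_idx + 1, min(start_idx + 5, n))
--     end = stop - 1
--     for i in range(start_idx, stop):
--         if lines[i].strip().endswith(';'):
--             end = i
--             break
--     return '\n'.join(lines[i] for i in range(start_idx, end + 1))
-- ===== Notes on version B (the rewrite author's own statement) =====
-- stated objective: alternative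
-- what changed: B first computes the end index of the declaration window by scanning for the first line ending in ';', then joins lines[start..end] in one pass, instead of A's accumulate-and-break string building inside the scan.
import Mathlib
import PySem

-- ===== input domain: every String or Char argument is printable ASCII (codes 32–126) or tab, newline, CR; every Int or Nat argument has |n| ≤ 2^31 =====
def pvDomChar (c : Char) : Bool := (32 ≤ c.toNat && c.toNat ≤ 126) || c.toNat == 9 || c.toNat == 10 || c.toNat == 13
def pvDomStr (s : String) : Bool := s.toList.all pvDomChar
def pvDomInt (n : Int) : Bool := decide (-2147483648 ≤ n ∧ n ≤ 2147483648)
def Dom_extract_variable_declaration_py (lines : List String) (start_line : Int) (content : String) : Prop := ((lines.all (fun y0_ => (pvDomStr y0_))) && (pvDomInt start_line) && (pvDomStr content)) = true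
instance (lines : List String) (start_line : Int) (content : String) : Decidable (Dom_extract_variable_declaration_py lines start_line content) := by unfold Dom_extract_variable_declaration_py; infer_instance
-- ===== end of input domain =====

-- B computes the window's end index first and joins the lines afterwards, instead of
-- A's accumulate-and-break string building inside the scan; same cost (alternative decomposition).


-- ===== PORT A =====
-- A's for-loop with its break: accumulate '\n' + lines[i] until a line whose strip ends with ';'.
-- Inside Pre_ every visited index is in range, so getD "" is never hit on a none.
def pvALoop (lines : List String) : List Int → String → String
  | [], line => line
  | i :: rest, line =>
      let x := (PySem.List.pyGet? lines i).getD ""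
      let line' := line ++ "\n" ++ x
      if PySem.Str.endswith (PySem.Str.strip x) ";" then line'
      else pvALoop lines rest line'

def extract_variable_declaration_py (lines : List String) (start_line : Int) (content : String) : String :=
  let start_idx := start_line - 1
  match PySem.List.pyGet? lines start_idx with
  | none =>
      -- except branch: lines[start_line - 1] raises again when start_line ≤ len(lines)
      -- (that re-raise is excluded by Pre_; "" is a placeholder there), else "".
      if start_line ≤ (lines.length : Int) then "" else ""
  | some line =>
      if PySem.Str.endswith (PySem.Str.strip line) ";" then line
      else pvALoop lines
            (PySem.List.pyRange (start_idx + 1) (min (start_idx + 5) (lines.length : Int)) 1) line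

-- ===== PORT B =====
-- B's first pass: the first index in the window whose stripped line ends with ';', else the default.
def pvFindEnd (lines : List String) (dflt : Int) : List Int → Int
  | [] => dflt
  | i :: rest =>
      if PySem.Str.endswith (PySem.Str.strip ((PySem.List.pyGet? lines i).getD "")) ";" then i
      else pvFindEnd lines dflt rest

def extract_variable_declaration_py_alt (lines : List String) (start_line : Int) (content : String) : String :=
  let n : Int := lines.length
  let start_idx := start_line - 1
  if start_idx ≥ n then ""
  else
    let stop := max (start_idx + 1) (min (start_idx + 5) n)
    let endIdx := pvFindEnd lines (stop - 1) (PySem.List.pyRange start_idx stop 1)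
    PySem.Str.join "\n"
      ((PySem.List.pyRange start_idx (endIdx + 1) 1).map
        (fun i => (PySem.List.pyGet? lines i).getD ""))

-- ===== PRECONDITION & SPEC =====
-- Pre_ excludes exactly the inputs where A raises (uncaught IndexError re-raised in the
-- bare except): start_line ≤ -len(lines), i.e. lines[start_line-1] out of range below.
def Pre_extract_variable_declaration_py (lines : List String) (start_line : Int) (content : String) : Prop :=
  -(lines.length : Int) < start_line
instance (lines : List String) (start_line : Int) (content : String) : Decidable (Pre_extract_variable_declaration_py lines start_line content) := by unfold Pre_extract_variable_declaration_py; infer_instance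

def pvWitness_extract_variable_declaration_py : List String × Int × String :=
  (["int a =", "  1;", "x"], 1, "")

def Spec_extract_variable_declaration_py (lines : List String) (start_line : Int) (content : String) (out : String) : Prop := out = extract_variable_declaration_py_alt lines start_line content
instance (lines : List String) (start_line : Int) (content : String) (out : String) : Decidable (Spec_extract_variable_declaration_py lines start_line content out) := by unfold Spec_extract_variable_declaration_py; infer_instance

-- ===== CLAIM (what is proved, stated in full; the proofs are below) =====
def Claim_equal_extract_variable_declaration_py : Prop := ∀ (lines : List String) (start_line : Int) (content : String), Dom_extract_variable_declaration_py lines start_line content → Pre_extract_variable_declaration_py lines start_line content → Spec_extract_variable_declaration_py lines start_line content (extract_variable_declaration_py lines start_line content)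

-- ===== LEMMAS AND PROOFS =====

lemma pv_join_cons_cons (y z : String) (l : List String) :
    PySem.Str.join "\n" (y :: z :: l) = y ++ "\n" ++ PySem.Str.join "\n" (z :: l) := by
  apply String.toList_inj.mp
  simp [PySem.Str.join, PySem.Chars.join_cons_cons]

lemma pv_join_glue (y z : String) (l : List String) :
    PySem.Str.join "\n" ((y ++ "\n" ++ z) :: l) = y ++ "\n" ++ PySem.Str.join "\n" (z :: l) := by
  apply String.toList_inj.mp
  cases l with
  | nil => simp [PySem.Str.join, PySem.Chars.join_singleton]
  | cons w r => simp [PySem.Str.join, PySem.Chars.join_cons_cons]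

lemma pv_join_singleton (y : String) : PySem.Str.join "\n" [y] = y := by
  simp [PySem.Str.join, PySem.Chars.join_singleton]

-- pvFindEnd returns either a member of the scanned list or the default.
lemma pvFindEnd_mem_or (lines : List String) (dflt : Int) (R : List Int) :
    pvFindEnd lines dflt R ∈ R ∨ pvFindEnd lines dflt R = dflt := by
  induction R with
  | nil => simp [pvFindEnd]
  | cons i rest ih =>
      simp only [pvFindEnd]
      split_ifs
      · simp
      · rcases ih with h | h
        · exact Or.inl (List.mem_cons_of_mem _ h)
        · exact Or.inr h

-- A's loop over range(a, a+k) equals acc joined with the lines up to B's end index.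
lemma pv_loop_eq (lines : List String) (k : Nat) :
    ∀ (a : Int) (acc : String),
      pvALoop lines (PySem.List.pyRange a (a + k) 1) acc =
        PySem.Str.join "\n"
          (acc :: (PySem.List.pyRange a
              (pvFindEnd lines (a + k - 1) (PySem.List.pyRange a (a + k) 1) + 1) 1).map
            (fun i => (PySem.List.pyGet? lines i).getD "")) := by
  induction k with
  | zero =>
      intro a acc
      rw [PySem.List.pyRange_one_eq_nil (by omega : a + ((0:Nat):Int) ≤ a)]
      simp only [pvALoop, pvFindEnd]
      rw [PySem.List.pyRange_one_eq_nil (by omega : a + ((0:Nat):Int) - 1 + 1 ≤ a)]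
      exact (pv_join_singleton acc).symm
  | succ m ih =>
      intro a acc
      rw [PySem.List.pyRange_one_cons (by push_cast; omega : a < a + ((m + 1 : Nat) : Int))]
      simp only [pvALoop, pvFindEnd]
      split_ifs with h
      · -- lines[a] ends with ';' : end = a, window is just [a]
        rw [PySem.List.pyRange_one_singleton]
        simp only [List.map_cons, List.map_nil]
        rw [pv_join_cons_cons, pv_join_singleton]
      · -- recurse from a+1
        have harg : a + 1 + (m : Int) = a + ((m + 1 : Nat) : Int) := by push_cast; omega
        have ih' := ih (a + 1) (acc ++ "\n" ++ (PySem.List.pyGet? lines a).getD "")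
        rw [harg] at ih'
        rw [ih']
        have hea : a ≤ pvFindEnd lines (a + ((m + 1 : Nat) : Int) - 1)
            (PySem.List.pyRange (a + 1) (a + ((m + 1 : Nat) : Int)) 1) := by
          rcases pvFindEnd_mem_or lines (a + ((m + 1 : Nat) : Int) - 1)
              (PySem.List.pyRange (a + 1) (a + ((m + 1 : Nat) : Int)) 1) with hm | hm
          · have := (PySem.List.mem_pyRange_one).mp hm
            omega
          · rw [hm]; push_cast; omega
        rw [PySem.List.pyRange_one_cons (by omega : a <
            pvFindEnd lines (a + ((m + 1 : Nat) : Int) - 1)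
              (PySem.List.pyRange (a + 1) (a + ((m + 1 : Nat) : Int)) 1) + 1)]
        simp only [List.map_cons]
        rw [pv_join_glue, pv_join_cons_cons]

-- The else branch: A's tail scan from a+1 equals B's join over range(a, end+1).
lemma pv_tail_eq (lines : List String) (a stop : Int) (x : String)
    (h1 : a + 1 ≤ stop) (hxd : (PySem.List.pyGet? lines a).getD "" = x) :
    pvALoop lines (PySem.List.pyRange (a + 1) stop 1) x =
      PySem.Str.join "\n"
        ((PySem.List.pyRange a
            (pvFindEnd lines (stop - 1) (PySem.List.pyRange (a + 1) stop 1) + 1) 1).map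
          (fun i => (PySem.List.pyGet? lines i).getD "")) := by
  obtain ⟨k, hk⟩ : ∃ k : Nat, stop = (a + 1) + k := ⟨(stop - (a + 1)).toNat, by omega⟩
  subst hk
  rw [pv_loop_eq lines k (a + 1) x]
  have hea : a ≤ pvFindEnd lines (a + 1 + (k:Int) - 1)
      (PySem.List.pyRange (a + 1) (a + 1 + (k:Int)) 1) := by
    rcases pvFindEnd_mem_or lines (a + 1 + (k:Int) - 1)
        (PySem.List.pyRange (a + 1) (a + 1 + (k:Int)) 1) with hm | hm
    · have := (PySem.List.mem_pyRange_one).mp hm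
      omega
    · rw [hm]; omega
  rw [PySem.List.pyRange_one_cons (by omega : a <
      pvFindEnd lines (a + 1 + (k:Int) - 1)
        (PySem.List.pyRange (a + 1) (a + 1 + (k:Int)) 1) + 1)]
  simp only [List.map_cons, hxd]

-- ===== VERDICT (by name: the statement is the Claim_ definition above) =====
theorem extract_variable_declaration_py_spec : Claim_equal_extract_variable_declaration_py := by
  intro lines start_line content _hdom hpre
  unfold Spec_extract_variable_declaration_py
  unfold Pre_extract_variable_declaration_py at hpre
  unfold extract_variable_declaration_py extract_variable_declaration_py_alt
  simp only []
  by_cases hhi : start_line - 1 ≥ (lines.length : Int)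
  · -- start index past the end: A's except returns "", B's guard returns ""
    have hnone : PySem.List.pyGet? lines (start_line - 1) = none := by
      rw [PySem.List.pyGet?_eq_none_iff]
      unfold PySem.Raise.InRange
      omega
    rw [hnone, if_pos hhi]
    split_ifs <;> rfl
  · -- start index in range (Pre_ gives the lower bound)
    obtain ⟨x, hx⟩ : ∃ x, PySem.List.pyGet? lines (start_line - 1) = some x := by
      cases h : PySem.List.pyGet? lines (start_line - 1) with
      | none =>
          rw [PySem.List.pyGet?_eq_none_iff] at h
          exact absurd (by unfold PySem.Raise.InRange; omega) h
      | some x => exact ⟨x, rfl⟩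
    rw [hx, if_neg hhi]
    have hxd : (PySem.List.pyGet? lines (start_line - 1)).getD "" = x := by rw [hx]; rfl
    have hstop1 : start_line - 1 + 1 ≤ max (start_line - 1 + 1)
        (min (start_line - 1 + 5) (lines.length : Int)) := le_max_left _ _
    rw [PySem.List.pyRange_one_cons (by omega : start_line - 1 <
        max (start_line - 1 + 1) (min (start_line - 1 + 5) (lines.length : Int)))]
    simp only [pvFindEnd, hxd]
    split_ifs with h
    · -- first line already ends with ';' : both sides are that line
      rw [PySem.List.pyRange_one_singleton]
      simp only [List.map_cons, List.map_nil, hxd]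
      rw [pv_join_singleton]
    · -- A's bound min(a+5, len) and B's stop give the same (possibly empty) range
      have hr : PySem.List.pyRange (start_line - 1 + 1)
            (min (start_line - 1 + 5) (lines.length : Int)) 1
          = PySem.List.pyRange (start_line - 1 + 1)
            (max (start_line - 1 + 1) (min (start_line - 1 + 5) (lines.length : Int))) 1 := by
        by_cases hm : start_line - 1 + 1 ≤ min (start_line - 1 + 5) (lines.length : Int)
        · congr 1; omega
        · rw [PySem.List.pyRange_one_eq_nil (by omega),
              PySem.List.pyRange_one_eq_nil (by omega :
                max (start_line - 1 + 1) (min (start_line - 1 + 5) (lines.length : Int))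
                  ≤ start_line - 1 + 1)]
      rw [hr]
      exact pv_tail_eq lines (start_line - 1) _ x hstop1 hxd
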